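-- pv_equiv track=rewrite | github.com/km-vibecoder/MusicalMarkdown | tools/mmd_transposer.py | _slots_to_events
-- ===== SOURCE A (Python) =====
-- def _slots_to_events(slots:list[str]) -> list[tuple[str, int]]:
--     """
--     Group beat slots into (attack_token, held_count) pairs.
--     Each non-empty slot is an attack; subsequent empty slots are held beats for that attack.
--     """
--     events: list[tuple[str, int]] = []
--     for slot in slots:
--         s = slot.strip()
--         if s:
--             events.append((s, 0))
--         else:
--             if events:
--                 tok, held = events[-1]
--                 events[-1] = (tok, held + 1)
--             else:
--                 events.append(('', 1))   # leading empty slot (unusual but valid)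
--     return events
-- ===== SOURCE B (Python) =====
-- def _slots_to_events(slots:list[str]) -> list[tuple[str, int]]:
--     """
--     Group beat slots into (attack_token, held_count) pairs, computed from the
--     table of attack indices: each held count is the gap to the next attack.
--     """
--     stripped = [s.strip() for s in slots]
--     attacks = [i for i, s in enumerate(stripped) if s]
--     if not slots:
--         return []
--     if not attacks:
--         return [('', len(slots))]
--     events = [('', attacks[0])] if attacks[0] > 0 else []
--     nexts = attacks[1:] + [len(slots)]
--     events += [(stripped[i], nxt - i - 1) for i, nxt in zip(attacks, nexts)]
--     return events
-- ===== Notes on version B (the rewrite author's own statement) =====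
-- stated objective: alternative
-- what changed: Replaced A's stateful loop that mutates the last event by a two-phase construction: build the table of attack indices first, then derive each held count as the gap between consecutive attack positions (and the leading-empty event from the first attack index).
import Mathlib
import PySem

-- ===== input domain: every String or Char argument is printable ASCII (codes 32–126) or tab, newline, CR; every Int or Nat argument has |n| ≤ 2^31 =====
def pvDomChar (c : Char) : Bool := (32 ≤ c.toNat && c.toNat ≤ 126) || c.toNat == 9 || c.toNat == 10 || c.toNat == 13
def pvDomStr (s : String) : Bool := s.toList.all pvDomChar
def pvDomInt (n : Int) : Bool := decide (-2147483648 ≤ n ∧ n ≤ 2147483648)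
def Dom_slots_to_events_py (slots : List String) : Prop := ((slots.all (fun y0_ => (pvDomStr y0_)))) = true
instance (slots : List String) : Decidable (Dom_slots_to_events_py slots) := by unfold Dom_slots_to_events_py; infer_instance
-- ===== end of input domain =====

-- B replaces A's mutate-the-last-event loop by an attack-index table from which
-- each held count is a difference of consecutive attack positions (objective: alternative decomposition).

-- ===== PORT A =====
def slots_to_events_py (slots : List String) : List (String × Int) :=
  slots.foldl (fun events slot =>
    let s := PySem.Str.strip slot
    if s ≠ "" then
      events ++ [(s, 0)]
    else
      if events ≠ [] then
        let last := events.getLast?.getD ("", 0)   -- events[-1]; guard ensures nonempty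
        events.dropLast ++ [(last.1, last.2 + 1)]  -- events[-1] = (tok, held + 1)
      else
        [("", 1)]) []

-- ===== PORT B =====
def slots_to_events_py_alt (slots : List String) : List (String × Int) :=
  let stripped := slots.map PySem.Str.strip
  let attacks := (PySem.List.enumerate stripped).filterMap (fun p => if p.2 ≠ "" then some p.1 else none)
  if slots = [] then []
  else if attacks = [] then [("", (slots.length : Int))]
  else
    let events := if 0 < attacks.headD 0 then [(("" : String), attacks.headD 0)] else []
    let nexts := attacks.drop 1 ++ [(slots.length : Int)]
    events ++ (attacks.zip nexts).map (fun p => (PySem.List.pyGetD stripped p.1 "", p.2 - p.1 - 1))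

-- ===== PRECONDITION & SPEC =====
def Spec_slots_to_events_py (slots : List String) (out : List (String × Int)) : Prop := out = slots_to_events_py_alt slots
instance (slots : List String) (out : List (String × Int)) : Decidable (Spec_slots_to_events_py slots out) := by unfold Spec_slots_to_events_py; infer_instance

-- ===== CLAIM (what is proved, stated in full; the proofs are below) =====
def Claim_equal_slots_to_events_py : Prop := ∀ (slots : List String), Dom_slots_to_events_py slots → Spec_slots_to_events_py slots (slots_to_events_py slots)

-- ===== LEMMAS AND PROOFS =====

-- the loop body of A, named for the proofs
def pvStep (events : List (String × Int)) (slot : String) : List (String × Int) :=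
  let s := PySem.Str.strip slot
  if s ≠ "" then
    events ++ [(s, 0)]
  else
    if events ≠ [] then
      let last := events.getLast?.getD ("", 0)
      events.dropLast ++ [(last.1, last.2 + 1)]
    else
      [("", 1)]

-- recursive (back-to-front) characterisation both ports are proved equal to
def pvR : List String → List (String × Int)
  | [] => []
  | x :: xs =>
    let r := pvR xs
    if PySem.Str.strip x ≠ "" then
      match r with
      | ("", k) :: rest => (PySem.Str.strip x, k) :: rest
      | _ => (PySem.Str.strip x, 0) :: r
    else
      match r with
      | ("", k) :: rest => ("", k + 1) :: rest
      | _ => ("", 1) :: r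

theorem pvStep_eq_foldl (slots : List String) :
    slots_to_events_py slots = slots.foldl pvStep [] := rfl

theorem pvStep_ne_nil (acc : List (String × Int)) (x : String) : pvStep acc x ≠ [] := by
  simp only [pvStep]
  split_ifs <;> simp

theorem pvStep_prefix (evs acc : List (String × Int)) (x : String) (h : acc ≠ []) :
    pvStep (evs ++ acc) x = evs ++ pvStep acc x := by
  simp only [pvStep]
  have hne : evs ++ acc ≠ [] := by simp [h]
  simp only [List.getLast?_append_of_ne_nil _ h, List.dropLast_append_of_ne_nil h]
  split_ifs <;> simp

theorem pvFoldl_prefix (xs : List String) (evs acc : List (String × Int)) (h : acc ≠ []) :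
    xs.foldl pvStep (evs ++ acc) = evs ++ xs.foldl pvStep acc := by
  induction xs generalizing acc with
  | nil => rfl
  | cons x xs ih =>
      simp only [List.foldl_cons, pvStep_prefix evs acc x h]
      exact ih (pvStep acc x) (pvStep_ne_nil acc x)

-- the result of merging the event e with the grouping of the remaining slots
def pvMerge (e : String × Int) (r : List (String × Int)) : List (String × Int) :=
  match r with
  | ("", k) :: rest => (e.1, e.2 + k) :: rest
  | _ => e :: r

theorem pvFoldl_single (xs : List String) (t : String) (h : Int) :
    xs.foldl pvStep [(t, h)] = pvMerge (t, h) (pvR xs) := by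
  induction xs generalizing t h with
  | nil => rfl
  | cons x xs ih =>
      by_cases hx : PySem.Str.strip x = ""
      · have hstep : pvStep [(t, h)] x = [(t, h + 1)] := by
          simp [pvStep, hx]
        rw [List.foldl_cons, hstep, ih]
        cases hr : pvR xs with
        | nil => simp [pvR, hr, pvMerge, hx]
        | cons y rest =>
            obtain ⟨yt, yk⟩ := y
            by_cases hy : yt = ""
            · subst hy; simp [pvR, hr, pvMerge, hx]; ring
            · simp [pvR, hr, pvMerge, hx, hy]
      · have hstep : pvStep [(t, h)] x = [(t, h)] ++ [(PySem.Str.strip x, 0)] := by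
          simp [pvStep, hx]
        rw [List.foldl_cons, hstep, pvFoldl_prefix xs [(t, h)] [(PySem.Str.strip x, 0)] (by simp), ih]
        cases hr : pvR xs with
        | nil => simp [pvR, hr, pvMerge, hx]
        | cons y rest =>
            obtain ⟨yt, yk⟩ := y
            by_cases hy : yt = ""
            · subst hy; simp [pvR, hr, pvMerge, hx]
            · simp [pvR, hr, pvMerge, hx, hy]

theorem pvA_eq_pvR (slots : List String) : slots_to_events_py slots = pvR slots := by
  cases slots with
  | nil => rfl
  | cons x xs =>
      rw [pvStep_eq_foldl, List.foldl_cons]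
      by_cases hx : PySem.Str.strip x = ""
      · have hstep : pvStep [] x = [(("" : String), (1 : Int))] := by simp [pvStep, hx]
        rw [hstep, pvFoldl_single]
        cases hr : pvR xs with
        | nil => simp [pvR, hr, pvMerge, hx]
        | cons y rest =>
            obtain ⟨yt, yk⟩ := y
            by_cases hy : yt = ""
            · subst hy; simp [pvR, hr, pvMerge, hx]; ring
            · simp [pvR, hr, pvMerge, hx, hy]
      · have hstep : pvStep [] x = [(PySem.Str.strip x, (0 : Int))] := by simp [pvStep, hx]
        rw [hstep, pvFoldl_single]
        cases hr : pvR xs with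
        | nil => simp [pvR, hr, pvMerge, hx]
        | cons y rest =>
            obtain ⟨yt, yk⟩ := y
            by_cases hy : yt = ""
            · subst hy; simp [pvR, hr, pvMerge, hx]
            · simp [pvR, hr, pvMerge, hx, hy]

-- B-side helpers for the proofs: the attack-index table and the event list it induces
def pvAux (l : List String) (s : Int) : List Int :=
  (PySem.List.enumerate l s).filterMap (fun p => if p.2 ≠ "" then some p.1 else none)

def pvEvs (stripped : List String) (len : Int) (attacks : List Int) : List (String × Int) :=
  (attacks.zip (attacks.drop 1 ++ [len])).map
    (fun p => (PySem.List.pyGetD stripped p.1 "", p.2 - p.1 - 1))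

theorem pvAlt_eq (slots : List String) :
    slots_to_events_py_alt slots =
      (if slots = [] then []
       else if pvAux (slots.map PySem.Str.strip) 0 = [] then [("", (slots.length : Int))]
       else (if 0 < (pvAux (slots.map PySem.Str.strip) 0).headD 0 then
               [(("" : String), (pvAux (slots.map PySem.Str.strip) 0).headD 0)] else []) ++
            pvEvs (slots.map PySem.Str.strip) slots.length (pvAux (slots.map PySem.Str.strip) 0)) := rfl

theorem pvAux_cons (x : String) (l : List String) (s : Int) :
    pvAux (x :: l) s = (if x ≠ "" then [s] else []) ++ pvAux l (s + 1) := by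
  by_cases hx : x = "" <;> simp [pvAux, PySem.List.enumerate_cons, hx]

theorem pvAux_shift (l : List String) (s : Int) :
    pvAux l (s + 1) = (pvAux l s).map (· + 1) := by
  induction l generalizing s with
  | nil => rfl
  | cons x l ih =>
      rw [pvAux_cons, pvAux_cons, ih (s + 1), List.map_append]
      by_cases hx : x = "" <;> simp [hx, ih]

theorem pvGetD_cons_succ (x : String) (l : List String) (i : Int) (h : 0 ≤ i) :
    PySem.List.pyGetD (x :: l) (i + 1) "" = PySem.List.pyGetD l i "" := by
  obtain ⟨n, rfl⟩ := Int.eq_ofNat_of_zero_le h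
  have : ((n : Int) + 1) = ((n + 1 : Nat) : Int) := by push_cast; ring
  rw [this, PySem.List.pyGetD_natCast, PySem.List.pyGetD_natCast]
  simp

theorem pvAux_sound (l : List String) (i : Int) (h : i ∈ pvAux l 0) :
    0 ≤ i ∧ PySem.List.pyGetD l i "" ≠ "" := by
  induction l generalizing i with
  | nil => simp [pvAux] at h
  | cons x l ih =>
      rw [pvAux_cons, pvAux_shift] at h
      rcases List.mem_append.1 h with h0 | h1
      · by_cases hx : x = "" <;> simp [hx] at h0
        subst h0
        exact ⟨le_refl 0, by simpa [PySem.List.pyGetD_zero_cons] using hx⟩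
      · obtain ⟨j, hj, rfl⟩ := List.mem_map.1 h1
        obtain ⟨hj0, hjv⟩ := ih j hj
        refine ⟨by omega, ?_⟩
        rw [pvGetD_cons_succ x l j hj0]
        exact hjv

theorem pvEvs_shift (x : String) (stripped : List String) (len : Int) (attacks : List Int)
    (h : ∀ i ∈ attacks, 0 ≤ i) :
    pvEvs (x :: stripped) (len + 1) (attacks.map (· + 1)) = pvEvs stripped len attacks := by
  unfold pvEvs
  have hdrop : (attacks.map (· + 1)).drop 1 ++ [len + 1]
      = (attacks.drop 1 ++ [len]).map (· + 1) := by
    simp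
  rw [hdrop, List.zip_map, List.map_map]
  refine List.map_congr_left ?_
  intro p hp
  obtain ⟨p1, p2⟩ := p
  obtain ⟨hi, -⟩ := List.of_mem_zip hp
  simp only [Function.comp, Prod.map]
  rw [pvGetD_cons_succ x stripped p1 (h p1 hi)]
  ring_nf

theorem pvEvs_cons (stripped : List String) (len : Int) (i : Int) (rest : List Int) :
    pvEvs stripped len (i :: rest)
      = (PySem.List.pyGetD stripped i "", rest.headD len - i - 1) :: pvEvs stripped len rest := by
  cases rest with
  | nil => simp [pvEvs]
  | cons k rest => simp [pvEvs]

theorem pvR_cons (x : String) (xs : List String) :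
    pvR (x :: xs)
      = pvMerge (if PySem.Str.strip x = "" then ("", 1) else (PySem.Str.strip x, 0)) (pvR xs) := by
  by_cases hx : PySem.Str.strip x = ""
  · cases hr : pvR xs with
    | nil => simp [pvR, hr, pvMerge, hx]
    | cons y rest =>
        obtain ⟨yt, yk⟩ := y
        by_cases hy : yt = ""
        · subst hy; simp [pvR, hr, pvMerge, hx]; ring
        · simp [pvR, hr, pvMerge, hx, hy]
  · cases hr : pvR xs with
    | nil => simp [pvR, hr, pvMerge, hx]
    | cons y rest =>
        obtain ⟨yt, yk⟩ := y
        by_cases hy : yt = ""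
        · subst hy; simp [pvR, hr, pvMerge, hx]
        · simp [pvR, hr, pvMerge, hx, hy]

theorem pvB_eq_pvR (slots : List String) : slots_to_events_py_alt slots = pvR slots := by
  induction slots with
  | nil => rfl
  | cons x xs ih =>
      have hnn : ∀ i ∈ pvAux (xs.map PySem.Str.strip) 0, 0 ≤ i :=
        fun i hi => (pvAux_sound _ i hi).1
      have hcast : (((x :: xs).length : Int)) = (xs.length : Int) + 1 := by
        push_cast [List.length_cons]; ring
      rw [pvAlt_eq, pvR_cons]
      by_cases hx : PySem.Str.strip x = ""
      · rw [if_pos hx]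
        cases has : pvAux (xs.map PySem.Str.strip) 0 with
        | nil =>
            have hattacks : pvAux ((x :: xs).map PySem.Str.strip) 0 = [] := by
              rw [List.map_cons, pvAux_cons, pvAux_shift, has]; simp [hx]
            rw [hattacks]
            cases xs with
            | nil => simp [pvMerge, ← ih, pvAlt_eq]
            | cons y ys =>
                have hRxs : pvR (y :: ys) = [("", ((y :: ys).length : Int))] := by
                  rw [← ih, pvAlt_eq, has]; simp
                rw [hRxs]
                simp [pvMerge, add_comm]
        | cons k rest =>
            have hxs_ne : xs ≠ [] := by
              intro h; rw [h] at has; simp [pvAux] at has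
            have hattacks : pvAux ((x :: xs).map PySem.Str.strip) 0
                = (k + 1) :: rest.map (· + 1) := by
              rw [List.map_cons, pvAux_cons, pvAux_shift, has]; simp [hx]
            have hk0 : 0 ≤ k := hnn k (by rw [has]; exact List.mem_cons_self)
            have hshift : pvEvs (PySem.Str.strip x :: xs.map PySem.Str.strip)
                ((xs.length : Int) + 1) ((k + 1) :: rest.map (· + 1))
                = pvEvs (xs.map PySem.Str.strip) (xs.length : Int) (k :: rest) := by
              have := pvEvs_shift (PySem.Str.strip x) (xs.map PySem.Str.strip)
                (xs.length : Int) (k :: rest)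
                (fun i hi => hnn i (by rw [has]; exact hi))
              simpa using this
            rw [hattacks, if_neg (show ¬(x :: xs = []) by simp),
              if_neg (show ¬((k + 1) :: rest.map (· + 1) = []) by simp),
              List.headD_cons, if_pos (show (0:Int) < k + 1 by omega),
              hcast, List.map_cons, hshift]
            by_cases hk : 0 < k
            · have hRxs : pvR xs = ("", k)
                  :: pvEvs (xs.map PySem.Str.strip) (xs.length : Int) (k :: rest) := by
                rw [← ih, pvAlt_eq, has, if_neg hxs_ne]; simp [hk]
              rw [hRxs]
              simp [pvMerge, add_comm]
            · have hk' : k = 0 := by omega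
              subst hk'
              have htok : PySem.List.pyGetD (xs.map PySem.Str.strip) 0 "" ≠ "" :=
                (pvAux_sound _ 0 (by rw [has]; exact List.mem_cons_self)).2
              have hRxs : pvR xs
                  = pvEvs (xs.map PySem.Str.strip) (xs.length : Int) (0 :: rest) := by
                rw [← ih, pvAlt_eq, has, if_neg hxs_ne]; simp
              rw [hRxs, pvEvs_cons]
              simp [pvMerge, htok]
      · rw [if_neg hx]
        cases has : pvAux (xs.map PySem.Str.strip) 0 with
        | nil =>
            have hattacks : pvAux ((x :: xs).map PySem.Str.strip) 0 = [(0 : Int)] := by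
              rw [List.map_cons, pvAux_cons, pvAux_shift, has]; simp [hx]
            rw [hattacks]
            cases xs with
            | nil => simp [pvMerge, pvR, pvEvs, PySem.List.pyGetD_zero_cons]
            | cons y ys =>
                have hRxs : pvR (y :: ys) = [("", ((y :: ys).length : Int))] := by
                  rw [← ih, pvAlt_eq, has]; simp
                rw [hRxs]
                simp [pvMerge, pvEvs, PySem.List.pyGetD_zero_cons]
        | cons k rest =>
            have hxs_ne : xs ≠ [] := by
              intro h; rw [h] at has; simp [pvAux] at has
            have hattacks : pvAux ((x :: xs).map PySem.Str.strip) 0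
                = 0 :: (k + 1) :: rest.map (· + 1) := by
              rw [List.map_cons, pvAux_cons, pvAux_shift, has]; simp [hx]
            have hk0 : 0 ≤ k := hnn k (by rw [has]; exact List.mem_cons_self)
            have hshift : pvEvs (PySem.Str.strip x :: xs.map PySem.Str.strip)
                ((xs.length : Int) + 1) ((k + 1) :: rest.map (· + 1))
                = pvEvs (xs.map PySem.Str.strip) (xs.length : Int) (k :: rest) := by
              have := pvEvs_shift (PySem.Str.strip x) (xs.map PySem.Str.strip)
                (xs.length : Int) (k :: rest)
                (fun i hi => hnn i (by rw [has]; exact hi))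
              simpa using this
            rw [hattacks, if_neg (show ¬(x :: xs = []) by simp),
              if_neg (show ¬((0 : Int) :: (k + 1) :: rest.map (· + 1) = []) by simp),
              List.headD_cons, if_neg (show ¬((0:Int) < 0) by omega),
              hcast, List.map_cons, pvEvs_cons, hshift, List.headD_cons]
            by_cases hk : 0 < k
            · have hRxs : pvR xs = ("", k)
                  :: pvEvs (xs.map PySem.Str.strip) (xs.length : Int) (k :: rest) := by
                rw [← ih, pvAlt_eq, has, if_neg hxs_ne]; simp [hk]
              rw [hRxs]
              simp [pvMerge, PySem.List.pyGetD_zero_cons]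
            · have hk' : k = 0 := by omega
              subst hk'
              have htok : PySem.List.pyGetD (xs.map PySem.Str.strip) 0 "" ≠ "" :=
                (pvAux_sound _ 0 (by rw [has]; exact List.mem_cons_self)).2
              have hRxs : pvR xs
                  = pvEvs (xs.map PySem.Str.strip) (xs.length : Int) (0 :: rest) := by
                rw [← ih, pvAlt_eq, has, if_neg hxs_ne]; simp
              rw [hRxs, pvEvs_cons]
              simp [pvMerge, htok, PySem.List.pyGetD_zero_cons]

-- ===== VERDICT (by name: the statement is the Claim_ definition above) =====
theorem slots_to_events_py_spec : Claim_equal_slots_to_events_py := by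
  intro slots _
  unfold Spec_slots_to_events_py
  rw [pvA_eq_pvR, pvB_eq_pvR]
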